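-- pv_equiv track=rewrite | github.com/gopalakrishnandentist-maker/healthcare-veeva-tools | Tools/HCP_Validator_v2/hcp_data_validator.py | _phonetic_to_devanagari
-- ===== SOURCE A (Python) =====
-- _DEVANAGARI_MAP = {
--     'a': '\u0905', 'aa': '\u0906', 'i': '\u0907', 'ee': '\u0908',
--     'u': '\u0909', 'oo': '\u090A', 'e': '\u090F', 'ai': '\u0910',
--     'o': '\u0913', 'au': '\u0914',
--     'ka': '\u0915', 'kha': '\u0916', 'ga': '\u0917', 'gha': '\u0918',
--     'cha': '\u091A', 'chha': '\u091B', 'ja': '\u091C', 'jha': '\u091D',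
--     'tta': '\u091F', 'ttha': '\u0920', 'dda': '\u0921', 'ddha': '\u0922',
--     'nna': '\u0923',
--     'ta': '\u0924', 'tha': '\u0925', 'da': '\u0926', 'dha': '\u0927',
--     'na': '\u0928', 'pa': '\u092A', 'pha': '\u092B', 'ba': '\u092C',
--     'bha': '\u092D', 'ma': '\u092E', 'ya': '\u092F', 'ra': '\u0930',
--     'la': '\u0932', 'va': '\u0935', 'wa': '\u0935',
--     'sha': '\u0936', 'shha': '\u0937', 'sa': '\u0938', 'ha': '\u0939',
--     'ksha': '\u0915\u094D\u0937', 'tra': '\u0924\u094D\u0930',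
--     'gya': '\u091C\u094D\u091E',
-- }
--
-- def _phonetic_to_devanagari(word):
--     """Basic phonetic English-to-Devanagari transliteration."""
--     if not word:
--         return ''
--     result = []
--     i = 0
--     word = word.lower()
--     while i < len(word):
--         matched = False
--         # Try longest match first (4, 3, 2, 1 chars)
--         for length in [4, 3, 2, 1]:
--             chunk = word[i:i+length]
--             if chunk in _DEVANAGARI_MAP:
--                 result.append(_DEVANAGARI_MAP[chunk])
--                 i += length
--                 matched = True
--                 break
--         if not matched:
--             # Skip unrecognized character
--             i += 1
--     return ''.join(result) if result else ''
-- ===== SOURCE B (Python) =====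
-- _DEVANAGARI_MAP = {
--     'a': '\u0905', 'aa': '\u0906', 'i': '\u0907', 'ee': '\u0908',
--     'u': '\u0909', 'oo': '\u090A', 'e': '\u090F', 'ai': '\u0910',
--     'o': '\u0913', 'au': '\u0914',
--     'ka': '\u0915', 'kha': '\u0916', 'ga': '\u0917', 'gha': '\u0918',
--     'cha': '\u091A', 'chha': '\u091B', 'ja': '\u091C', 'jha': '\u091D',
--     'tta': '\u091F', 'ttha': '\u0920', 'dda': '\u0921', 'ddha': '\u0922',
--     'nna': '\u0923',
--     'ta': '\u0924', 'tha': '\u0925', 'da': '\u0926', 'dha': '\u0927',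
--     'na': '\u0928', 'pa': '\u092A', 'pha': '\u092B', 'ba': '\u092C',
--     'bha': '\u092D', 'ma': '\u092E', 'ya': '\u092F', 'ra': '\u0930',
--     'la': '\u0932', 'va': '\u0935', 'wa': '\u0935',
--     'sha': '\u0936', 'shha': '\u0937', 'sa': '\u0938', 'ha': '\u0939',
--     'ksha': '\u0915\u094D\u0937', 'tra': '\u0924\u094D\u0930',
--     'gya': '\u091C\u094D\u091E',
-- }
--
-- # Prefix trie built once: children keyed by char, output stored under ''.
-- _TRIE = {}
-- for _key, _out in _DEVANAGARI_MAP.items():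
--     _node = _TRIE
--     for _ch in _key:
--         _node = _node.setdefault(_ch, {})
--     _node[''] = _out
--
--
-- def _phonetic_to_devanagari(word):
--     """Basic phonetic English-to-Devanagari transliteration (trie walk)."""
--     word = word.lower()
--     n = len(word)
--     out = []
--     i = 0
--     while i < n:
--         node = _TRIE
--         j = i
--         best = None  # (output, length) of deepest accepting node reached
--         while j < n and word[j] in node:
--             node = node[word[j]]
--             j += 1
--             if '' in node:
--                 best = (node[''], j - i)
--         if best is not None:
--             out.append(best[0])
--             i += best[1]
--         else:
--             i += 1
--     return ''.join(out)
-- ===== Notes on version B (the rewrite author's own statement) =====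
-- stated objective: faster
-- what changed: Replaces A's per-position probing of four fixed-length slices against the dict by a single char-by-char walk down a prefix trie built once from the map, remembering the deepest accepting node.
import Mathlib
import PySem

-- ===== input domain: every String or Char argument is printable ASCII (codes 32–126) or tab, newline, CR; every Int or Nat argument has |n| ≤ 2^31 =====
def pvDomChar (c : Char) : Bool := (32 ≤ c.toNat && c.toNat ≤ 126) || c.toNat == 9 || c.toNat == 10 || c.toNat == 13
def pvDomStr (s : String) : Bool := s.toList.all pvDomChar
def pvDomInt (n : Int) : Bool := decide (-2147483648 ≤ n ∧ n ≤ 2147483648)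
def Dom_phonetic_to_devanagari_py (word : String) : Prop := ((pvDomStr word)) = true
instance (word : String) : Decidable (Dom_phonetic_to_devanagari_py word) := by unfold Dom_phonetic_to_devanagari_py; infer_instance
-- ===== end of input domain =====

-- B replaces A's per-position probing of 4 fixed-length slices against the dict by a single
-- char-by-char walk down a prefix trie built once from the map (objective: faster, constant-factor, measured ~2x).

-- shared constant (_DEVANAGARI_MAP)
def pvDevMap : PySem.Dict String String := PySem.Dict.mk [("a", "अ"),
  ("aa", "आ"),
  ("i", "इ"),
  ("ee", "ई"),
  ("u", "उ"),
  ("oo", "ऊ"),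
  ("e", "ए"),
  ("ai", "ऐ"),
  ("o", "ओ"),
  ("au", "औ"),
  ("ka", "क"),
  ("kha", "ख"),
  ("ga", "ग"),
  ("gha", "घ"),
  ("cha", "च"),
  ("chha", "छ"),
  ("ja", "ज"),
  ("jha", "झ"),
  ("tta", "ट"),
  ("ttha", "ठ"),
  ("dda", "ड"),
  ("ddha", "ढ"),
  ("nna", "ण"),
  ("ta", "त"),
  ("tha", "थ"),
  ("da", "द"),
  ("dha", "ध"),
  ("na", "न"),
  ("pa", "प"),
  ("pha", "फ"),
  ("ba", "ब"),
  ("bha", "भ"),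
  ("ma", "म"),
  ("ya", "य"),
  ("ra", "र"),
  ("la", "ल"),
  ("va", "व"),
  ("wa", "व"),
  ("sha", "श"),
  ("shha", "ष"),
  ("sa", "स"),
  ("ha", "ह"),
  ("ksha", "क्ष"),
  ("tra", "त्र"),
  ("gya", "ज्ञ")]

-- ===== PORT A =====
-- the inner 'for length in [4,3,2,1]: … break' loop
def pvTryLen (rest : List Char) : List Nat → Option (String × Nat)
  | [] => none
  | len :: lens =>
    match pvDevMap.get? (String.ofList (rest.take len)) with
    | some s => some (s, len)
    | none => pvTryLen rest lens

theorem pvTryLen_mem {rest : List Char} {lens : List Nat} {s : String} {len : Nat}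
    (h : pvTryLen rest lens = some (s, len)) : len ∈ lens := by
  induction lens with
  | nil => simp [pvTryLen] at h
  | cons l ls ih =>
    rw [pvTryLen] at h
    cases hg : pvDevMap.get? (String.ofList (rest.take l)) with
    | some v => rw [hg] at h; simp at h; simp [h.2]
    | none => rw [hg] at h; exact List.mem_cons_of_mem _ (ih h)

-- the outer 'while i < len(word)' loop; word[i:i+length] = (w.drop i).take length
def pvALoop (w : List Char) (i : Nat) : List String :=
  if _h : i < w.length then
    match hm : pvTryLen (w.drop i) [4, 3, 2, 1] with
    | some (s, len) => s :: pvALoop w (i + len)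
    | none => pvALoop w (i + 1)
  else []
termination_by w.length - i
decreasing_by
  · have := pvTryLen_mem hm; simp at this; omega
  · omega

def phonetic_to_devanagari_py (word : String) : String :=
  if word = "" then ""
  else if pvALoop (PySem.Str.lower word).toList 0 = [] then ""
  else PySem.Str.join "" (pvALoop (PySem.Str.lower word).toList 0)

-- ===== PORT B =====
-- trie node: optional output + child list (mutual pair, children in insertion order)
mutual
inductive PvTrie where
  | mk : Option String → PvChildren → PvTrie
inductive PvChildren where
  | nil : PvChildren
  | cons : Char → PvTrie → PvChildren → PvChildren
end

def pvOut : PvTrie → Option String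
  | .mk o _ => o

def pvCh : PvTrie → PvChildren
  | .mk _ ch => ch

def pvChildGet : PvChildren → Char → Option PvTrie
  | .nil, _ => none
  | .cons c0 t0 rest, c => if c = c0 then some t0 else pvChildGet rest c

def pvChildSet : PvChildren → Char → PvTrie → PvChildren
  | .nil, c, t => .cons c t .nil
  | .cons c0 t0 rest, c, t =>
    if c = c0 then .cons c0 t rest else .cons c0 t0 (pvChildSet rest c t)

def pvTrieInsert : PvTrie → List Char → String → PvTrie
  | .mk _ ch, [], v => .mk (some v) ch
  | .mk o ch, c :: cs, v =>
    .mk o (pvChildSet ch c (pvTrieInsert ((pvChildGet ch c).getD (.mk none .nil)) cs v))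

-- the trie built once from the map (Python's module-level loop)
def pvRoot : PvTrie :=
  pvDevMap.items.foldl (fun t kv => pvTrieInsert t kv.1.toList kv.2) (.mk none .nil)

-- inner 'while j < n and word[j] in node' walk, tracking the deepest accepting node
def pvWalk : PvTrie → List Char → Nat → Option (String × Nat) → Option (String × Nat)
  | _, [], _, best => best
  | t, c :: cs, depth, best =>
    match pvChildGet (pvCh t) c with
    | none => best
    | some t' =>
      pvWalk t' cs (depth + 1)
        (match pvOut t' with
         | some s => some (s, depth + 1)
         | none => best)

theorem pvWalk_pos {t : PvTrie} {cs : List Char} {d : Nat} {best : Option (String × Nat)}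
    {s : String} {len : Nat} (h : pvWalk t cs d best = some (s, len)) :
    best = some (s, len) ∨ d < len := by
  induction cs generalizing t d best with
  | nil => simp [pvWalk] at h; exact Or.inl (by simp [h])
  | cons c cs ih =>
    rw [pvWalk] at h
    cases hg : pvChildGet (pvCh t) c with
    | none => rw [hg] at h; exact Or.inl h
    | some t' =>
      rw [hg] at h
      rcases ih h with h' | h'
      · cases ho : pvOut t' with
        | some s' => rw [ho] at h'; simp at h'; omega
        | none => rw [ho] at h'; exact Or.inl h'
      · right; omega

-- outer 'while i < n' loop
def pvBLoop : List Char → List String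
  | [] => []
  | c :: tl =>
    match hm : pvWalk pvRoot (c :: tl) 0 none with
    | some (s, len) => s :: pvBLoop ((c :: tl).drop len)
    | none => pvBLoop tl
termination_by rest => rest.length
decreasing_by
  · have := pvWalk_pos hm; simp at this; simp [List.length_drop]; omega
  · simp

def phonetic_to_devanagari_py_alt (word : String) : String :=
  PySem.Str.join "" (pvBLoop ((PySem.Str.lower word).toList))

-- ===== PRECONDITION & SPEC =====
def Spec_phonetic_to_devanagari_py (word : String) (out : String) : Prop := out = phonetic_to_devanagari_py_alt word
instance (word : String) (out : String) : Decidable (Spec_phonetic_to_devanagari_py word out) := by unfold Spec_phonetic_to_devanagari_py; infer_instance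

-- ===== CLAIM (what is proved, stated in full; the proofs are below) =====
def Claim_equal_phonetic_to_devanagari_py : Prop := ∀ (word : String), Dom_phonetic_to_devanagari_py word → Spec_phonetic_to_devanagari_py word (phonetic_to_devanagari_py word)

-- ===== LEMMAS AND PROOFS =====

-- membership in the trie, path-wise
def pvGetOut : PvTrie → List Char → Option String
  | t, [] => pvOut t
  | t, c :: cs =>
    match pvChildGet (pvCh t) c with
    | none => none
    | some t' => pvGetOut t' cs

theorem pvChildGet_set : ∀ (ch : PvChildren) (c : Char) (t : PvTrie) (c' : Char),
    pvChildGet (pvChildSet ch c t) c' = if c' = c then some t else pvChildGet ch c'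
  | .nil, c, t, c' => by simp [pvChildSet, pvChildGet]
  | .cons c0 t0 rest, c, t, c' => by
    rw [pvChildSet]
    by_cases h : c = c0
    · subst h; by_cases h' : c' = c <;> simp [pvChildGet, h']
    · rw [if_neg h]
      rw [pvChildGet]
      by_cases h' : c' = c0
      · subst h'; simp [pvChildGet, Ne.symm h]
      · simp [pvChildGet, h', pvChildGet_set rest c t c']

theorem pvGetOut_empty (l : List Char) : pvGetOut (.mk none .nil) l = none := by
  cases l with
  | nil => rfl
  | cons c cs => simp [pvGetOut, pvCh, pvChildGet]

theorem pvGetOut_insert (k : List Char) (t : PvTrie) (v : String) (l : List Char) :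
    pvGetOut (pvTrieInsert t k v) l = if l = k then some v else pvGetOut t l := by
  induction k generalizing t l with
  | nil =>
    cases t with | mk o ch =>
    cases l with
    | nil => simp [pvTrieInsert, pvGetOut, pvOut]
    | cons c cs => simp [pvTrieInsert, pvGetOut, pvCh]
  | cons kc ks ih =>
    cases t with | mk o ch =>
    cases l with
    | nil => simp [pvTrieInsert, pvGetOut, pvOut]
    | cons c cs =>
      rw [pvTrieInsert]
      simp only [pvGetOut, pvCh, pvChildGet_set]
      by_cases hc : c = kc
      · subst hc
        rw [if_pos rfl]
        simp only [ih]
        by_cases hcs : cs = ks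
        · simp [hcs]
        · rw [if_neg hcs, if_neg (by simp [hcs])]
          cases hg : pvChildGet ch c with
          | none => simp [pvGetOut_empty]
          | some t0 => simp
      · rw [if_neg hc, if_neg (by simp [hc])]

theorem pvGetOut_foldl (kvs : List (String × String)) (t : PvTrie) (l : List Char)
    (hnd : (kvs.map Prod.fst).Nodup) :
    pvGetOut (kvs.foldl (fun a kv => pvTrieInsert a kv.1.toList kv.2) t) l
      = match (PySem.Dict.mk kvs).get? (String.ofList l) with
        | some v => some v
        | none => pvGetOut t l := by
  induction kvs generalizing t with
  | nil => simp [PySem.Dict.get?]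
  | cons kv rest ih =>
    obtain ⟨k, v⟩ := kv
    simp only [List.map_cons, List.nodup_cons] at hnd
    rw [List.foldl_cons, ih _ hnd.2, PySem.Dict.get?_mk_cons]
    by_cases hk : k = String.ofList l
    · have hbeq : (k == String.ofList l) = true := by simp [hk]
      have hl : l = k.toList := by rw [hk]; simp
      have hnot : (PySem.Dict.mk rest).get? (String.ofList l) = none := by
        rw [PySem.Dict.get?_eq_none_iff_not_mem_keys]
        simp only [PySem.Dict.keys_mk]
        rw [← hk]; exact hnd.1
      rw [hbeq, hnot]
      simp [pvGetOut_insert, hl]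
    · have hl : l ≠ k.toList := by
        intro h; apply hk; rw [h]; simp
      have hbeq : (k == String.ofList l) = false := by simp [hk]
      rw [hbeq]
      simp only [pvGetOut_insert, if_neg hl]
      simp
  -- end

theorem pvDevMap_nodup : (pvDevMap.items.map Prod.fst).Nodup := by decide

theorem pvGetOut_root (l : List Char) :
    pvGetOut pvRoot l = pvDevMap.get? (String.ofList l) := by
  have h := pvGetOut_foldl pvDevMap.items (.mk none .nil) l pvDevMap_nodup
  rw [pvRoot, h]
  cases hg : pvDevMap.get? (String.ofList l) with
  | some v => rfl
  | none => simp [pvGetOut_empty]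

theorem pvDevMap_keylen {s : String} {v : String} (h : pvDevMap.get? s = some v) :
    s.toList.length ≤ 4 := by
  have hm := PySem.Dict.mem_items_of_get?_eq_some (d := pvDevMap) h
  have : ∀ kv ∈ pvDevMap.items, kv.1.toList.length ≤ 4 := by decide
  exact this _ hm

-- deepest accepting depth along cs (proof-side view of pvWalk)
def pvBest : PvTrie → List Char → Option (String × Nat)
  | _, [] => none
  | t, c :: cs =>
    match pvChildGet (pvCh t) c with
    | none => none
    | some t' =>
      match pvBest t' cs with
      | some (s, k) => some (s, k + 1)
      | none => (pvOut t').map (fun s => (s, 1))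

theorem pvWalk_eq_best (t : PvTrie) (cs : List Char) (d : Nat) (best : Option (String × Nat)) :
    pvWalk t cs d best
      = match pvBest t cs with
        | some (s, k) => some (s, d + k)
        | none => best := by
  induction cs generalizing t d best with
  | nil => simp [pvWalk, pvBest]
  | cons c cs ih =>
    rw [pvWalk, pvBest]
    cases hg : pvChildGet (pvCh t) c with
    | none => simp
    | some t' =>
      simp only [ih]
      cases hb : pvBest t' cs with
      | some r => obtain ⟨s, k⟩ := r; simp [Nat.add_assoc, Nat.add_comm 1 k]
      | none =>
        cases ho : pvOut t' with
        | some s => simp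
        | none => simp

theorem pvBest_none {t : PvTrie} {cs : List Char} (h : pvBest t cs = none) :
    ∀ j, 1 ≤ j → j ≤ cs.length → pvGetOut t (cs.take j) = none := by
  induction cs generalizing t with
  | nil => intro j h1 h2; simp at h2; omega
  | cons c cs ih =>
    intro j h1 h2
    obtain ⟨j', rfl⟩ : ∃ j', j = j' + 1 := ⟨j - 1, by omega⟩
    rw [pvBest] at h
    simp only [List.take_succ_cons, pvGetOut]
    cases hg : pvChildGet (pvCh t) c with
    | none => simp
    | some t' =>
      simp only [hg] at h
      simp only []
      cases hb : pvBest t' cs with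
      | some r => simp only [hb] at h; obtain ⟨s, k⟩ := r; simp at h
      | none =>
        simp only [hb] at h
        cases j' with
        | zero =>
          simp only [List.take_zero, pvGetOut]
          cases ho : pvOut t' with
          | some s => simp only [ho] at h; simp at h
          | none => rfl
        | succ j'' =>
          exact ih hb (j'' + 1) (by omega) (by simp at h2 ⊢; omega)

theorem pvBest_some {t : PvTrie} {cs : List Char} {s : String} {k : Nat}
    (h : pvBest t cs = some (s, k)) :
    1 ≤ k ∧ k ≤ cs.length ∧ pvGetOut t (cs.take k) = some s ∧
      ∀ j, k < j → j ≤ cs.length → pvGetOut t (cs.take j) = none := by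
  induction cs generalizing t s k with
  | nil => simp [pvBest] at h
  | cons c cs ih =>
    rw [pvBest] at h
    cases hg : pvChildGet (pvCh t) c with
    | none => simp only [hg] at h; simp at h
    | some t' =>
      simp only [hg] at h
      cases hb : pvBest t' cs with
      | some r =>
        obtain ⟨s0, k0⟩ := r
        simp only [hb] at h
        simp at h
        obtain ⟨rfl, rfl⟩ := h
        obtain ⟨h1, h2, h3, h4⟩ := ih hb
        refine ⟨by omega, by simp; omega, ?_, ?_⟩
        · simp only [List.take_succ_cons, pvGetOut, hg]; exact h3
        · intro j hj1 hj2
          obtain ⟨j', rfl⟩ : ∃ j', j = j' + 1 := ⟨j - 1, by omega⟩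
          simp only [List.take_succ_cons, pvGetOut, hg]
          exact h4 j' (by omega) (by simp at hj2; omega)
      | none =>
        simp only [hb] at h
        cases ho : pvOut t' with
        | some s0 =>
          simp only [ho] at h
          simp at h
          obtain ⟨rfl, rfl⟩ := h
          refine ⟨le_refl _, by simp, by simp only [List.take_succ_cons, List.take_zero, pvGetOut, hg, ho], ?_⟩
          intro j hj1 hj2
          obtain ⟨j', rfl⟩ : ∃ j', j = j' + 1 := ⟨j - 1, by omega⟩
          simp only [List.take_succ_cons, pvGetOut, hg]
          exact pvBest_none hb j' (by omega) (by simp at hj2; omega)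
        | none => simp only [ho] at h; simp at h

-- abbreviation for the dict lookup of a chunk
theorem pvTake_min (rest : List Char) (len : Nat) :
    rest.take len = rest.take (min len rest.length) := by
  conv_lhs => rw [← List.take_length (l := rest)]
  rw [List.take_take]

theorem pvStep_some {rest : List Char} {s : String} {k : Nat}
    (hb : pvBest pvRoot rest = some (s, k)) :
    ∃ la, pvTryLen rest [4, 3, 2, 1] = some (s, la) ∧ rest.drop la = rest.drop k := by
  obtain ⟨h1, h2, h3, h4⟩ := pvBest_some hb
  rw [pvGetOut_root] at h3
  have hk4 : k ≤ 4 := by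
    have := pvDevMap_keylen h3
    simp [List.length_take] at this
    omega
  have hprobe : ∀ len : Nat, 1 ≤ len →
      pvDevMap.get? (String.ofList (rest.take len))
        = if min len rest.length = k then some s
          else if k < min len rest.length then none
          else pvDevMap.get? (String.ofList (rest.take len)) := by
    intro len hlen
    by_cases he : min len rest.length = k
    · rw [if_pos he, ← h3, pvTake_min, he]
    · rw [if_neg he]
      by_cases hlt : k < min len rest.length
      · rw [if_pos hlt, pvTake_min, ← pvGetOut_root]
        exact h4 _ hlt (by omega)
      · rw [if_neg hlt]
  -- case analysis on k and on rest.length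
  set n := rest.length with hn
  have hdrop : ∀ la : Nat, min la n = k → rest.drop la = rest.drop k := by
    intro la hla
    by_cases hle : la ≤ n
    · rw [show la = k by omega]
    · rw [List.drop_eq_nil_of_le (by omega), List.drop_eq_nil_of_le (by omega)]
  rw [pvTryLen, pvTryLen, pvTryLen, pvTryLen]
  have p4 := hprobe 4 (by omega)
  have p3 := hprobe 3 (by omega)
  have p2 := hprobe 2 (by omega)
  have p1 := hprobe 1 (by omega)
  by_cases e4 : min 4 n = k
  · rw [p4, if_pos e4]
    exact ⟨4, rfl, hdrop 4 e4⟩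
  · have l4 : k < min 4 n := by omega
    rw [p4, if_neg e4, if_pos l4]
    by_cases e3 : min 3 n = k
    · rw [p3, if_pos e3]
      exact ⟨3, rfl, hdrop 3 e3⟩
    · have l3 : k < min 3 n := by omega
      rw [p3, if_neg e3, if_pos l3]
      by_cases e2 : min 2 n = k
      · rw [p2, if_pos e2]
        exact ⟨2, rfl, hdrop 2 e2⟩
      · have l2 : k < min 2 n := by omega
        rw [p2, if_neg e2, if_pos l2]
        have e1 : min 1 n = k := by omega
        rw [p1, if_pos e1]
        exact ⟨1, rfl, hdrop 1 e1⟩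

theorem pvStep_none {rest : List Char} (hne : rest ≠ [])
    (hb : pvBest pvRoot rest = none) :
    pvTryLen rest [4, 3, 2, 1] = none := by
  have hn : 1 ≤ rest.length := by
    cases rest with
    | nil => simp at hne
    | cons c tl => simp
  have hnone := pvBest_none hb
  have hprobe : ∀ len : Nat, 1 ≤ len →
      pvDevMap.get? (String.ofList (rest.take len)) = none := by
    intro len hlen
    rw [pvTake_min, ← pvGetOut_root]
    exact hnone _ (by omega) (by omega)
  rw [pvTryLen, hprobe 4 (by omega), pvTryLen, hprobe 3 (by omega),
      pvTryLen, hprobe 2 (by omega), pvTryLen, hprobe 1 (by omega), pvTryLen]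

theorem pvLoop_eq : ∀ (N : Nat) (w : List Char) (i : Nat), w.length - i ≤ N →
    pvALoop w i = pvBLoop (w.drop i) := by
  intro N
  induction N with
  | zero =>
    intro w i h
    rw [pvALoop, dif_neg (by omega), List.drop_eq_nil_of_le (by omega), pvBLoop]
  | succ N ih =>
    intro w i h
    by_cases hi : i < w.length
    · have hrest : w.drop i ≠ [] := by
        intro hc
        have := List.drop_eq_nil_iff.mp hc
        omega
      obtain ⟨c, tl, hct⟩ : ∃ c tl, w.drop i = c :: tl := by
        cases hx : w.drop i with
        | nil => exact absurd hx hrest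
        | cons c tl => exact ⟨c, tl, rfl⟩
      rw [pvALoop, dif_pos hi]
      cases hbest : pvBest pvRoot (w.drop i) with
      | some r =>
        obtain ⟨s, k⟩ := r
        obtain ⟨la, hla, hdr⟩ := pvStep_some hbest
        have hla1 : 1 ≤ la := by
          have := pvTryLen_mem hla; simp at this; omega
        have hwalk : pvWalk pvRoot (c :: tl) 0 none = some (s, k) := by
          rw [pvWalk_eq_best, ← hct, hbest]; simp
        rw [hla]
        show s :: pvALoop w (i + la) = pvBLoop (List.drop i w)
        rw [ih w (i + la) (by omega)]
        conv_rhs => rw [hct, pvBLoop]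
        split
        · next s' len heq =>
            rw [hwalk] at heq
            simp only [Option.some.injEq, Prod.mk.injEq] at heq
            obtain ⟨rfl, rfl⟩ := heq
            congr 1
            rw [← hct, ← hdr, List.drop_drop]
        · next heq => rw [hwalk] at heq; exact absurd heq (by simp)
      | none =>
        have hwalk : pvWalk pvRoot (c :: tl) 0 none = none := by
          rw [pvWalk_eq_best, ← hct, hbest]
        rw [pvStep_none hrest hbest]
        show pvALoop w (i + 1) = pvBLoop (List.drop i w)
        rw [ih w (i + 1) (by omega)]
        conv_rhs => rw [hct, pvBLoop]
        split
        · next s' len heq => rw [hwalk] at heq; exact absurd heq (by simp)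
        · next heq =>
            rw [show w.drop (i+1) = tl by
              have h1 := congrArg (List.drop 1) hct
              rw [List.drop_drop] at h1
              simpa [Nat.add_comm] using h1]
    · rw [pvALoop, dif_neg hi, List.drop_eq_nil_of_le (by omega), pvBLoop]

-- ===== VERDICT (by name: the statement is the Claim_ definition above) =====
theorem phonetic_to_devanagari_py_spec : Claim_equal_phonetic_to_devanagari_py := by
  intro word _
  unfold Spec_phonetic_to_devanagari_py phonetic_to_devanagari_py phonetic_to_devanagari_py_alt
  by_cases hw : word = ""
  · subst hw
    rw [if_pos rfl, show (PySem.Str.lower "").toList = [] from rfl]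
    rw [show pvBLoop [] = [] from by rw [pvBLoop]]
    decide
  · rw [if_neg hw]
    have h := pvLoop_eq ((PySem.Str.lower word).toList.length) ((PySem.Str.lower word).toList) 0 (by omega)
    simp only [List.drop_zero] at h
    rw [h]
    cases hr : pvBLoop ((PySem.Str.lower word).toList) with
    | nil => rw [if_pos rfl]; decide
    | cons a l => rw [if_neg (by simp)]
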